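-- pv_equiv track=rewrite | github.com/Narukodo/adventofcode2019 | day4/day4.py | has_duplicate_digits
-- ===== SOURCE A (Python) =====
-- def has_duplicate_digits(number):
--     string_number = str(number)
--     freq = [0] * 10
--     pair = False
--     duplicates = False
--     for i in range(len(string_number)):
--         freq[int(string_number[i])] += 1
--     for f in freq:
--         if f == 2:
--             pair = True
--             duplicates = True
--         if f > 2:
--             duplicates = True
--     return pair and duplicates
-- ===== SOURCE B (Python) =====
-- def has_duplicate_digits(number):
--     digits = sorted(int(c) for c in str(number))
--     prev = None
--     run = 0
--     for d in digits:
--         if d == prev: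
--             run += 1
--         else:
--             if run == 2:
--                 return True
--             prev = d
--             run = 1
--     return run == 2
-- ===== Notes on version B (the rewrite author's own statement) =====
-- stated objective: alternative
-- what changed: A builds a ten-slot frequency table in one index loop and then scans the table for a slot equal to 2; B instead sorts the digit values and scans consecutive runs once, returning True as soon as a finished run has length exactly 2.
import Mathlib
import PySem

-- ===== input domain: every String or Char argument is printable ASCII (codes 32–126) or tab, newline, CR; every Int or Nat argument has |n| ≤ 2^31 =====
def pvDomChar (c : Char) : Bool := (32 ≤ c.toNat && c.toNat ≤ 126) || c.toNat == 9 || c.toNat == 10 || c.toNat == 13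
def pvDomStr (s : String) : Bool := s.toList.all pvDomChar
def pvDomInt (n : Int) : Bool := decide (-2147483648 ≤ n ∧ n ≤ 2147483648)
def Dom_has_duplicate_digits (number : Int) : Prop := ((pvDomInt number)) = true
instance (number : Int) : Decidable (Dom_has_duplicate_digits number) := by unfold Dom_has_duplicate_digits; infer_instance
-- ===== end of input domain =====

-- B replaces A's ten-slot frequency table and second scan with sort-then-scan of
-- consecutive runs (objective: alternative algorithm, similar cost).


-- ===== PORT A =====
-- int(c) for a single character c (exact: PySem.Int.ofStr? is int(s))
def pvCharInt? (c : Char) : Option Int := PySem.Int.ofStr? (String.ofList [c])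

-- freq[int(string_number[i])] += 1  (skips when int() would raise; under Pre_ it never does)
def pvBump (fr : List Int) (c : Char) : List Int :=
  match pvCharInt? c with
  | some d => fr.set d.toNat (fr.getD d.toNat 0 + 1)
  | none => fr

def has_duplicate_digits (number : Int) : Bool :=
  let s := PySem.Int.toChars number
  let freq := (PySem.List.pyRange 0 s.length 1).foldl
      (fun fr i => pvBump fr (PySem.List.pyGetD s i ' ')) (List.replicate 10 0)
  let pd := freq.foldl
      (fun (pd : Bool × Bool) f =>
        (if f == 2 then true else pd.1,
         if f > 2 then true else if f == 2 then true else pd.2))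
      (false, false)
  pd.1 && pd.2

-- ===== PORT B =====
-- the run scan with early return: prev/run state, final check run == 2
def pvRunScan (prev : Option Int) (run : Int) : List Int → Bool
  | [] => run == 2
  | d :: rest =>
      if some d == prev then pvRunScan prev (run + 1) rest
      else if run == 2 then true else pvRunScan (some d) 1 rest

def has_duplicate_digits_alt (number : Int) : Bool :=
  let digits := PySem.List.sorted
      ((PySem.Int.toChars number).filterMap pvCharInt?) (fun x => x) false
  pvRunScan none 0 digits

-- ===== PRECONDITION & SPEC =====
-- Pre_ excludes negative numbers: on them str(number) contains '-' and int('-') raises ValueError in A (and in B).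
def Pre_has_duplicate_digits (number : Int) : Prop := 0 ≤ number
instance (number : Int) : Decidable (Pre_has_duplicate_digits number) := by
  unfold Pre_has_duplicate_digits; infer_instance

def pvWitness_has_duplicate_digits : Int := 122

def Spec_has_duplicate_digits (number : Int) (out : Bool) : Prop := out = has_duplicate_digits_alt number
instance (number : Int) (out : Bool) : Decidable (Spec_has_duplicate_digits number out) := by unfold Spec_has_duplicate_digits; infer_instance

-- ===== CLAIM (what is proved, stated in full; the proofs are below) =====
def Claim_equal_has_duplicate_digits : Prop := ∀ (number : Int), Dom_has_duplicate_digits number → Pre_has_duplicate_digits number → Spec_has_duplicate_digits number (has_duplicate_digits number)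

-- ===== LEMMAS AND PROOFS =====

-- every char produced by Nat.toDigitsCore is from the accumulator or a digitChar below 10
theorem pv_mem_toDigitsCore (fuel : Nat) : ∀ (n : Nat) (acc : List Char) (c : Char),
    c ∈ Nat.toDigitsCore 10 fuel n acc → c ∈ acc ∨ ∃ m, m < 10 ∧ c = Nat.digitChar m := by
  induction fuel with
  | zero => intro n acc c h; exact Or.inl h
  | succ fuel ih =>
    intro n acc c h
    simp only [Nat.toDigitsCore] at h
    by_cases h0 : n / 10 = 0
    · rw [if_pos h0] at h
      rcases List.mem_cons.mp h with h | h
      · exact Or.inr ⟨n % 10, Nat.mod_lt _ (by omega), h⟩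
      · exact Or.inl h
    · rw [if_neg h0] at h
      rcases ih (n / 10) (Nat.digitChar (n % 10) :: acc) c h with h | h
      · rcases List.mem_cons.mp h with h | h
        · exact Or.inr ⟨n % 10, Nat.mod_lt _ (by omega), h⟩
        · exact Or.inl h
      · exact Or.inr h

theorem pvCharInt?_digitChar (m : Nat) (hm : m < 10) :
    pvCharInt? (Nat.digitChar m) = some (m : Int) := by
  interval_cases m <;> decide

-- every value int() extracts from a char of str(number) is a digit value
theorem pv_digit_bound (number : Int) (c : Char) (hc : c ∈ PySem.Int.toChars number)
    (v : Int) (hv : pvCharInt? c = some v) : 0 ≤ v ∧ v < 10 := by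
  have hdig : c ∈ Nat.toDigits 10 number.natAbs ∨ c ∈ Nat.toDigits 10 number.toNat ∨ c = '-' := by
    unfold PySem.Int.toChars at hc
    split at hc
    · rcases List.mem_cons.mp hc with h | h
      · exact Or.inr (Or.inr h)
      · exact Or.inl h
    · exact Or.inr (Or.inl hc)
  rcases hdig with h | h | h
  · rcases pv_mem_toDigitsCore _ _ _ _ h with h | ⟨m, hm, rfl⟩
    · simp at h
    · rw [pvCharInt?_digitChar m hm] at hv
      cases hv; constructor <;> [positivity; exact_mod_cast hm]
  · rcases pv_mem_toDigitsCore _ _ _ _ h with h | ⟨m, hm, rfl⟩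
    · simp at h
    · rw [pvCharInt?_digitChar m hm] at hv
      cases hv; constructor <;> [positivity; exact_mod_cast hm]
  · subst h
    have : pvCharInt? '-' = none := by decide
    rw [this] at hv; cases hv

theorem pvBump_length (fr : List Int) (c : Char) : (pvBump fr c).length = fr.length := by
  unfold pvBump; split <;> simp

theorem pvFreq_length (l : List Char) : ∀ fr : List Int, (l.foldl pvBump fr).length = fr.length := by
  induction l with
  | nil => intro fr; rfl
  | cons c l ih => intro fr; rw [List.foldl_cons, ih, pvBump_length]

-- the frequency loop computes counts of the extracted digit values
theorem pvFreq_getD (l : List Char)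
    (hd : ∀ c ∈ l, ∀ v, pvCharInt? c = some v → 0 ≤ v ∧ v < 10) :
    ∀ (fr : List Int), fr.length = 10 → ∀ k, k < 10 →
      (l.foldl pvBump fr).getD k 0 = fr.getD k 0 + ((l.filterMap pvCharInt?).count (k : Int) : Int) := by
  induction l with
  | nil => intro fr _ k _; simp
  | cons c l ih =>
    intro fr hlen k hk
    have hd' : ∀ c ∈ l, ∀ v, pvCharInt? c = some v → 0 ≤ v ∧ v < 10 :=
      fun c hc => hd c (List.mem_cons_of_mem _ hc)
    rw [List.foldl_cons, List.filterMap_cons]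
    cases hfc : pvCharInt? c with
    | none =>
      have : pvBump fr c = fr := by unfold pvBump; rw [hfc]
      rw [this, ih hd' fr hlen k hk]
    | some v =>
      obtain ⟨hv0, hv10⟩ := hd c List.mem_cons_self v hfc
      have hbump : pvBump fr c = fr.set v.toNat (fr.getD v.toNat 0 + 1) := by
        unfold pvBump; rw [hfc]
      have hlen' : (fr.set v.toNat (fr.getD v.toNat 0 + 1)).length = 10 := by
        rw [List.length_set]; exact hlen
      rw [hbump, ih hd' _ hlen' k hk, List.count_cons]
      have hvN : v.toNat < 10 := by omega
      have hset : (fr.set v.toNat (fr.getD v.toNat 0 + 1)).getD k 0 =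
          if v.toNat = k then fr.getD v.toNat 0 + 1 else fr.getD k 0 := by
        have hk' : k < fr.length := by omega
        have hv' : v.toNat < fr.length := by omega
        by_cases h : v.toNat = k
        · subst h
          rw [List.getD_eq_getElem _ _ (by simpa using hk'), List.getElem_set_self, if_pos rfl]
        · rw [List.getD_eq_getElem _ _ (by simpa using hk'),
            List.getElem_set_ne (by omega), if_neg h, List.getD_eq_getElem _ _ hk']
      rw [hset]
      by_cases h : v.toNat = k
      · rw [if_pos h, h, if_pos (by simp; omega)]
        push_cast; ring
      · rw [if_neg h, if_neg (by simp; omega)]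
        push_cast; ring

-- the report loop is a pair of any-scans
theorem pvPairLoop (l : List Int) (b1 b2 : Bool) :
    l.foldl (fun (pd : Bool × Bool) f =>
        (if f == 2 then true else pd.1,
         if f > 2 then true else if f == 2 then true else pd.2)) (b1, b2)
      = (b1 || l.any (fun f => f == 2), b2 || l.any (fun f => f == 2 || decide (f > 2))) := by
  induction l generalizing b1 b2 with
  | nil => simp
  | cons x xs ih =>
    rw [List.foldl_cons, ih, List.any_cons, List.any_cons]
    refine Prod.ext ?_ ?_
    · by_cases h : x = (2 : Int)
      · simp [h, Bool.or_assoc, Bool.or_comm, Bool.or_left_comm]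
      · simp [beq_eq_false_iff_ne.mpr h]
    · by_cases h : x = (2 : Int)
      · simp [h]
      · by_cases h' : (2 : Int) < x <;>
          simp [beq_eq_false_iff_ne.mpr h, h', gt_iff_lt, Bool.or_assoc, Bool.or_comm, Bool.or_left_comm]

-- the run scan, started inside a run of value p with current length r
theorem pvRunScan_some (S : List Int) : ∀ (p r : Int), (p :: S).Pairwise (· ≤ ·) →
    (pvRunScan (some p) r S = true ↔
      r + (S.count p : Int) = 2 ∨ ∃ v, p < v ∧ S.count v = 2) := by
  induction S with
  | nil =>
    intro p r _
    simp [pvRunScan]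
  | cons d rest ih =>
    intro p r hpw
    have hpd : p ≤ d := (List.pairwise_cons.mp hpw).1 d List.mem_cons_self
    have hrest : (d :: rest).Pairwise (· ≤ ·) := (List.pairwise_cons.mp hpw).2
    by_cases hdp : d = p
    · subst hdp
      have hscan : pvRunScan (some d) r (d :: rest) = pvRunScan (some d) (r + 1) rest := by
        simp [pvRunScan]
      rw [hscan, ih d (r + 1) hrest]
      constructor
      · rintro (h | ⟨v, hv, hc⟩)
        · left; rw [List.count_cons_self]; push_cast at h ⊢; omega
        · right; refine ⟨v, hv, ?_⟩
          rw [List.count_cons_of_ne (by omega)]; exact hc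
      · rintro (h | ⟨v, hv, hc⟩)
        · left; rw [List.count_cons_self] at h; push_cast at h ⊢; omega
        · right; refine ⟨v, hv, ?_⟩
          rw [List.count_cons_of_ne (by omega)] at hc; exact hc
    · have hpltd : p < d := lt_of_le_of_ne hpd (fun h => hdp h.symm)
      have hstep : pvRunScan (some p) r (d :: rest) =
          if r == 2 then true else pvRunScan (some d) 1 rest := by
        simp [pvRunScan, hdp]
      have hnotp : p ∉ rest := by
        intro hmem
        have := (List.pairwise_cons.mp hrest).1 p hmem
        omega
      have hcp : (d :: rest).count p = 0 := by
        rw [List.count_eq_zero]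
        intro hmem
        rcases List.mem_cons.mp hmem with h | h
        · exact hdp h.symm
        · exact hnotp h
      rw [hstep, hcp]
      by_cases hr : r = (2 : Int)
      · rw [if_pos (by exact_mod_cast (beq_iff_eq.mpr hr))]
        constructor
        · intro _; left; omega
        · intro _; trivial
      · rw [if_neg (by simpa using hr), ih d 1 hrest]
        constructor
        · rintro (h | ⟨v, hv, hc⟩)
          · right; refine ⟨d, hpltd, ?_⟩
            rw [List.count_cons_self]; push_cast at h ⊢; omega
          · right; refine ⟨v, by omega, ?_⟩
            rw [List.count_cons_of_ne (by omega)]; exact hc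
        · rintro (h | ⟨v, hv, hc⟩)
          · omega
          · by_cases hvd : v = d
            · subst hvd
              rw [List.count_cons_self] at hc
              left; push_cast; omega
            · rw [List.count_cons_of_ne (Ne.symm hvd)] at hc
              have hmem : v ∈ rest := by
                apply List.count_pos_iff.mp; omega
              have hvge : d ≤ v := (List.pairwise_cons.mp hrest).1 v hmem
              right; exact ⟨v, by omega, hc⟩

-- B's scan on a sorted list finds exactly the values with count 2
theorem pvRunScan_none (S : List Int) (h : S.Pairwise (· ≤ ·)) :
    pvRunScan none 0 S = true ↔ ∃ v, S.count v = 2 := by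
  cases S with
  | nil =>
    constructor
    · intro hc; simp [pvRunScan] at hc
    · rintro ⟨v, hv⟩; simp at hv
  | cons d rest =>
    have hstep : pvRunScan none 0 (d :: rest) = pvRunScan (some d) 1 rest := by
      simp [pvRunScan]
    rw [hstep, pvRunScan_some rest d 1 h]
    constructor
    · rintro (hc | ⟨v, hv, hc⟩)
      · exact ⟨d, by rw [List.count_cons_self]; push_cast at hc; omega⟩
      · exact ⟨v, by rw [List.count_cons_of_ne (by omega)]; exact hc⟩
    · rintro ⟨v, hv⟩
      by_cases hvd : v = d
      · subst hvd
        rw [List.count_cons_self] at hv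
        left; push_cast; omega
      · rw [List.count_cons_of_ne (Ne.symm hvd)] at hv
        have hmem : v ∈ rest := by apply List.count_pos_iff.mp; omega
        have hge : d ≤ v := (List.pairwise_cons.mp h).1 v hmem
        right; exact ⟨v, lt_of_le_of_ne hge (fun h2 => hvd h2.symm), hv⟩

theorem pv_replicate_getD (k : Nat) (hk : k < 10) :
    (List.replicate 10 (0 : Int)).getD k 0 = 0 := by
  interval_cases k <;> decide

-- A's result equals "some extracted digit value has count exactly 2"
theorem pvA_iff (number : Int) :
    has_duplicate_digits number = true ↔
      ∃ v : Int, ((PySem.Int.toChars number).filterMap pvCharInt?).count v = 2 := by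
  unfold has_duplicate_digits
  simp only []
  rw [PySem.List.foldl_pyRange_zero_pyGetD']
  set L := PySem.Int.toChars number with hL
  set D := L.filterMap pvCharInt? with hD
  set freq := L.foldl pvBump (List.replicate 10 0) with hfreq
  have hd : ∀ c ∈ L, ∀ v, pvCharInt? c = some v → 0 ≤ v ∧ v < 10 :=
    fun c hc v hv => pv_digit_bound number c hc v hv
  have hflen : freq.length = 10 := by rw [hfreq, pvFreq_length]; rfl
  have hcnt : ∀ k : Nat, k < 10 → freq.getD k 0 = (D.count (k : Int) : Int) := by
    intro k hk
    rw [hfreq, pvFreq_getD L hd (List.replicate 10 0) (by rfl) k hk, pv_replicate_getD k hk]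
    ring
  rw [pvPairLoop]
  simp only [Bool.false_or]
  have hmono : freq.any (fun f => f == 2) = true →
      freq.any (fun f => f == 2 || decide (f > 2)) = true := by
    intro h
    rw [List.any_eq_true] at h ⊢
    obtain ⟨x, hx, hx2⟩ := h
    exact ⟨x, hx, by rw [hx2]; rfl⟩
  constructor
  · intro h
    have h1 : freq.any (fun f => f == 2) = true := by
      cases hq : freq.any (fun f => f == 2)
      · rw [hq] at h; simp at h
      · rfl
    rw [List.any_eq_true] at h1
    obtain ⟨x, hx, hx2⟩ := h1
    obtain ⟨k, hk, hgx⟩ := List.mem_iff_getElem.mp hx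
    have hk10 : k < 10 := by omega
    have : x = (D.count (k : Int) : Int) := by
      rw [← hcnt k hk10, List.getD_eq_getElem _ _ hk, hgx]
    refine ⟨(k : Int), ?_⟩
    have : x = (2 : Int) := beq_iff_eq.mp hx2
    omega
  · rintro ⟨v, hv⟩
    have hvD : v ∈ D := by apply List.count_pos_iff.mp; omega
    obtain ⟨c, hc, hfc⟩ := List.mem_filterMap.mp hvD
    obtain ⟨hv0, hv10⟩ := hd c hc v hfc
    have hkN : v.toNat < 10 := by omega
    have hvk : ((v.toNat : Nat) : Int) = v := by omega
    have hx : freq.getD v.toNat 0 = 2 := by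
      rw [hcnt v.toNat hkN, hvk, hv]; rfl
    have hmem : (2 : Int) ∈ freq := by
      rw [← hx, List.getD_eq_getElem _ _ (by omega)]
      exact List.getElem_mem _
    have h1 : freq.any (fun f => f == 2) = true :=
      List.any_eq_true.mpr ⟨2, hmem, rfl⟩
    rw [h1, hmono h1]; rfl

-- B's result equals the same condition
theorem pvB_iff (number : Int) :
    has_duplicate_digits_alt number = true ↔
      ∃ v : Int, ((PySem.Int.toChars number).filterMap pvCharInt?).count v = 2 := by
  unfold has_duplicate_digits_alt
  set D := (PySem.Int.toChars number).filterMap pvCharInt? with hD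
  set S := PySem.List.sorted D (fun x => x) false with hS
  have hperm : S.Perm D := PySem.List.sorted_perm D (fun x => x) false
  have hpw : S.Pairwise (· ≤ ·) := by
    have := PySem.List.sorted_pairwise D (fun x => x)
    simpa using this
  rw [pvRunScan_none S hpw]
  constructor
  · rintro ⟨v, hv⟩; exact ⟨v, by rw [← hperm.count_eq]; exact hv⟩
  · rintro ⟨v, hv⟩; exact ⟨v, by rw [hperm.count_eq]; exact hv⟩

-- ===== VERDICT (by name: the statement is the Claim_ definition above) =====
theorem has_duplicate_digits_spec : Claim_equal_has_duplicate_digits := by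
  intro number _ _
  unfold Spec_has_duplicate_digits
  have hA := pvA_iff number
  have hB := pvB_iff number
  cases ha : has_duplicate_digits number <;> cases hb : has_duplicate_digits_alt number
  · rfl
  · exact absurd (hA.mpr (hB.mp hb)) (by rw [ha]; simp)
  · exact absurd (hB.mpr (hA.mp ha)) (by rw [hb]; simp)
  · rfl
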